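-- pv_equiv track=rewrite | github.com/heyboiiiii/PLC_ESP32 | apps/transform_code/rewrite.py | delete_repeat_variables_est
-- ===== SOURCE A (Python) =====
-- variables_est=[
--     "uint8_t LD_I1 = 0;\n"
--     ,"uint8_t LD_I2 = 0;\n"
--     ,"uint8_t LD_I3 = 0;\n"
--     ,"uint8_t LD_I4 = 0;\n"
--     ,"uint8_t LD_I5 = 0;\n"
--     ,"uint8_t LD_I6 = 0;\n"
--     ,"uint8_t LD_Q1 = 0;\n"
--     ,"uint8_t LD_Q2 = 0;\n"
--     ,"uint8_t LD_Q3 = 0;\n"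
--     ,"uint8_t LD_Q4 = 0;\n"
-- ]
--
-- def delete_repeat_variables_est(cont_archivo_init):
--     i_start = 0
--     i_end = 0
--     contador=0
--     lineas = cont_archivo_init
--
--     for var in variables_est:
--
--         for i,linea in enumerate(lineas):
--
--             if var in linea:
--                 lineas[i] = ""
--                 break
--     return lineas
-- ===== SOURCE B (Python) =====
-- variables_est=[
--     "uint8_t LD_I1 = 0;\n"
--     ,"uint8_t LD_I2 = 0;\n"
--     ,"uint8_t LD_I3 = 0;\n"
--     ,"uint8_t LD_I4 = 0;\n"
--     ,"uint8_t LD_I5 = 0;\n"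
--     ,"uint8_t LD_I6 = 0;\n"
--     ,"uint8_t LD_Q1 = 0;\n"
--     ,"uint8_t LD_Q2 = 0;\n"
--     ,"uint8_t LD_Q3 = 0;\n"
--     ,"uint8_t LD_Q4 = 0;\n"
-- ]
--
-- def delete_repeat_variables_est(cont_archivo_init):
--     # one forward pass; maintain the shrinking list of still-unmatched declarations
--     remaining = list(variables_est)
--     for i, linea in enumerate(cont_archivo_init):
--         if not remaining:
--             break
--         for var in remaining:
--             if var in linea:
--                 cont_archivo_init[i] = ""
--                 remaining.remove(var)
--                 break
--     return cont_archivo_init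
-- ===== Notes on version B (the rewrite author's own statement) =====
-- stated objective: alternative
-- what changed: A rescans the whole line list once per each of the 10 fixed declarations; B makes a single forward pass over the lines maintaining the shrinking list of still-unmatched declarations, blanking a line for the lowest-index remaining declaration it contains, with early exit once all are matched.
import Mathlib
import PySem

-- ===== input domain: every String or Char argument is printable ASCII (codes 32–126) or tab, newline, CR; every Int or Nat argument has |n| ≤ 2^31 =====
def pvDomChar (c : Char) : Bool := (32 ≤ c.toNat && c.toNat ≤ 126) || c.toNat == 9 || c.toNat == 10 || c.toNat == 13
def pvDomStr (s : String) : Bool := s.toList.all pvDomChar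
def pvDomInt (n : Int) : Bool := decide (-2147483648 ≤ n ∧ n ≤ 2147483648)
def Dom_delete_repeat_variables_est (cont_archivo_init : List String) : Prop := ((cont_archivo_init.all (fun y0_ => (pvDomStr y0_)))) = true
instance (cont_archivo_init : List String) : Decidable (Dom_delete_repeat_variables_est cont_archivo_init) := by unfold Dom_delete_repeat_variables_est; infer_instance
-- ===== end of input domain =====

-- B replaces A's per-declaration rescans of the whole list by one forward pass with a
-- shrinking set of unmatched declarations and early exit (objective: alternative, one pass; same cost).
-- Both A and B mutate the argument list in place in Python; the equivalence proved here
-- is about the returned value (the same list).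

def variables_est : List String :=
  [ "uint8_t LD_I1 = 0;\n"
  , "uint8_t LD_I2 = 0;\n"
  , "uint8_t LD_I3 = 0;\n"
  , "uint8_t LD_I4 = 0;\n"
  , "uint8_t LD_I5 = 0;\n"
  , "uint8_t LD_I6 = 0;\n"
  , "uint8_t LD_Q1 = 0;\n"
  , "uint8_t LD_Q2 = 0;\n"
  , "uint8_t LD_Q3 = 0;\n"
  , "uint8_t LD_Q4 = 0;\n" ]

-- ===== PORT A =====
-- inner loop 'for i,linea in enumerate(lineas): if var in linea: lineas[i] = ""; break'
def blankFirst (var : String) : List String → List String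
  | [] => []
  | l :: ls => if PySem.Str.isIn var l then "" :: ls else l :: blankFirst var ls

def delete_repeat_variables_est (cont_archivo_init : List String) : List String :=
  let _i_start : Int := 0
  let _i_end : Int := 0
  let _contador : Int := 0
  let lineas := cont_archivo_init
  variables_est.foldl (fun lineas var => blankFirst var lineas) lineas

-- ===== PORT B =====
-- single pass over the lines; 'remaining' shrinks; early exit when it is empty
def goB : List String → List String → List String
  | [], lineas => lineas                 -- 'if not remaining: break'
  | _ :: _, [] => []
  | v :: vs, l :: ls =>
    match (v :: vs).find? (fun w => PySem.Str.isIn w l) with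
    -- 'remaining.remove(w)' always succeeds here (w was found in remaining), so it is List.erase
    | some w => "" :: goB ((v :: vs).erase w) ls
    | none => l :: goB (v :: vs) ls

def delete_repeat_variables_est_alt (cont_archivo_init : List String) : List String :=
  goB variables_est cont_archivo_init

-- ===== PRECONDITION & SPEC =====
def Spec_delete_repeat_variables_est (cont_archivo_init : List String) (out : List String) : Prop := out = delete_repeat_variables_est_alt cont_archivo_init
instance (cont_archivo_init : List String) (out : List String) : Decidable (Spec_delete_repeat_variables_est cont_archivo_init out) := by unfold Spec_delete_repeat_variables_est; infer_instance

-- ===== CLAIM (what is proved, stated in full; the proofs are below) =====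
def Claim_equal_delete_repeat_variables_est : Prop := ∀ (cont_archivo_init : List String), Dom_delete_repeat_variables_est cont_archivo_init → Spec_delete_repeat_variables_est cont_archivo_init (delete_repeat_variables_est cont_archivo_init)

-- ===== LEMMAS AND PROOFS =====

theorem goB_nil (ls : List String) : goB [] ls = ls := by
  cases ls <;> simp only [goB]

theorem find?_isIn_cons_pos (v l : String) (vs : List String)
    (hv : PySem.Str.isIn v l = true) :
    List.find? (fun w => PySem.Str.isIn w l) (v :: vs) = some v :=
  List.find?_cons_of_pos (show (fun w => PySem.Str.isIn w l) v = true from hv)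

theorem find?_isIn_cons_neg (v l : String) (vs : List String)
    (hv : ¬ PySem.Str.isIn v l = true) :
    List.find? (fun w => PySem.Str.isIn w l) (v :: vs)
      = List.find? (fun w => PySem.Str.isIn w l) vs :=
  List.find?_cons_of_neg (show ¬ (fun w => PySem.Str.isIn w l) v = true from hv)

-- a nonempty string is not a substring of ""
theorem isIn_empty_of_ne (v : String) (h : v ≠ "") : PySem.Str.isIn v "" = false := by
  rw [← Bool.not_eq_true, PySem.Str.isIn_iff_infix]
  intro hinf
  exact h (String.toList_eq_nil_iff.mp (List.eq_nil_of_infix_nil (by simpa using hinf)))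

-- a blanked line matches no remaining declaration, so B walks past it
theorem goB_blank (vs ls : List String) (h : ∀ w ∈ vs, w ≠ "") :
    goB vs ("" :: ls) = "" :: goB vs ls := by
  cases vs with
  | nil => simp only [goB_nil]
  | cons v vs' =>
    have hfind : List.find? (fun w => PySem.Str.isIn w "") (v :: vs') = none := by
      apply List.find?_eq_none.mpr
      intro w hw hc
      rw [isIn_empty_of_ne w (h w hw)] at hc
      exact Bool.false_ne_true hc
    simp only [goB]
    rw [hfind]

-- peeling the head declaration off B's remaining set = running A's inner loop first
theorem goB_step (v : String) :
    ∀ (ls vs : List String), (∀ w ∈ vs, w ≠ "") →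
    goB (v :: vs) ls = goB vs (blankFirst v ls) := by
  intro ls
  induction ls with
  | nil => intro vs _; cases vs <;> rfl
  | cons l ls ih =>
    intro vs h
    by_cases hv : PySem.Str.isIn v l = true
    · -- the head declaration matches this line: both sides blank it
      have hblank : blankFirst v (l :: ls) = "" :: ls := by
        simp only [blankFirst]; rw [if_pos hv]
      rw [hblank]
      simp only [goB]
      rw [find?_isIn_cons_pos v l vs hv]
      dsimp only
      rw [List.erase_cons_head, goB_blank vs ls h]
    · have hblank : blankFirst v (l :: ls) = l :: blankFirst v ls := by
        simp only [blankFirst]; rw [if_neg hv]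
      rw [hblank]
      cases hf : vs.find? (fun w => PySem.Str.isIn w l) with
      | some w =>
        -- some later declaration matches this line in both runs
        have hwmem : w ∈ vs := List.mem_of_find?_eq_some hf
        have hwin : PySem.Str.isIn w l = true := by
          have := List.find?_some hf; simpa using this
        have hvw : ¬ (v = w) := fun e => hv (e ▸ hwin)
        obtain ⟨a, as, rfl⟩ : ∃ a as, vs = a :: as := by
          cases vs with
          | nil => cases hwmem
          | cons a as => exact ⟨a, as, rfl⟩
        have herase : (v :: a :: as).erase w = v :: (a :: as).erase w := by
          rw [List.erase_cons_tail]
          simp [hvw]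
        simp only [goB]
        rw [find?_isIn_cons_neg v l (a :: as) hv, hf]
        dsimp only
        rw [herase]
        exact congrArg _ (ih _ (fun x hx => h x (List.mem_of_mem_erase hx)))
      | none =>
        -- no remaining declaration matches this line; both keep it
        cases vs with
        | nil =>
          simp only [goB]
          rw [find?_isIn_cons_neg v l [] hv, hf]
          dsimp only
          rw [ih [] (by intro x hx; cases hx), goB_nil]
        | cons a as =>
          simp only [goB]
          rw [find?_isIn_cons_neg v l (a :: as) hv, hf]
          dsimp only
          rw [ih _ h]

theorem goB_eq_foldl :
    ∀ (vs lines : List String), (∀ w ∈ vs, w ≠ "") →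
    goB vs lines = vs.foldl (fun L var => blankFirst var L) lines := by
  intro vs
  induction vs with
  | nil => intro lines _; rw [goB_nil, List.foldl_nil]
  | cons v vs ih =>
    intro lines h
    rw [List.foldl_cons,
        ← ih (blankFirst v lines) (fun w hw => h w (List.mem_cons_of_mem _ hw)),
        goB_step v lines vs (fun w hw => h w (List.mem_cons_of_mem _ hw))]

-- ===== VERDICT (by name: the statement is the Claim_ definition above) =====
theorem delete_repeat_variables_est_spec : Claim_equal_delete_repeat_variables_est := by
  intro lines _
  unfold Spec_delete_repeat_variables_est delete_repeat_variables_est delete_repeat_variables_est_alt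
  exact (goB_eq_foldl variables_est lines (by decide)).symm
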